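-- pv_equiv track=rewrite | github.com/kristinajak/CS50 | sentimental-credit/credit.py | n1
-- ===== SOURCE A (Python) =====
-- def n1(number):
--
--     num = int(number)
--
-- # Initializing a list
--
--     n1 = []
--
--     while num > 0:
--
--         # Getting every second digit from the end
--
--         digit = num % 100
--         digit = int(digit / 10)
--         n1.append(digit)
--
--         num = int(num / 100)
--
--     return n1
-- ===== SOURCE B (Python) =====
-- def n1(number):
--     num = int(number)
--     ds = []
--     while num > 0:
--         ds.append(num % 10)
--         num //= 10
--     out = []
--     while ds:
--         ds.pop(0)                              # skip the units digit of the pair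
--         out.append(ds.pop(0) if ds else 0)     # its tens digit, or 0 for a lone final digit
--     return out
-- ===== Notes on version B (the rewrite author's own statement) =====
-- stated objective: alternative
-- what changed: A peels two digits per loop iteration with modulo-by-a-hundred arithmetic and truncating division; B first builds the whole least-significant-first decimal digit list in one loop, then consumes that list pairwise in a second loop, popping the units digit of each pair and emitting its tens digit (zero for a lone final digit).
import Mathlib
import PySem

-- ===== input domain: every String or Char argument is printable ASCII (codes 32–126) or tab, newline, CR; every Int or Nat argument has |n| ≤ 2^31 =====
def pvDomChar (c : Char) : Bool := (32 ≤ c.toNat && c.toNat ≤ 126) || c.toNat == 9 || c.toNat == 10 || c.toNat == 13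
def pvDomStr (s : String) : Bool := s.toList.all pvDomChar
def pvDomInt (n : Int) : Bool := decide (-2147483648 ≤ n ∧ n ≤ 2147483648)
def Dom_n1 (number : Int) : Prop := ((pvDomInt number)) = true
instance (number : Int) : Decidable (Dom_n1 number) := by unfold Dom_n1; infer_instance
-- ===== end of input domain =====

-- B replaces A's %100 // 10 arithmetic pair-peeling by two phases — build the full digit list,
-- then consume it in pairs — same values, a different decomposition (objective: alternative).

-- ===== PORT A =====
-- A's 'int(num / 100)' / 'int(digit / 10)' are float division truncated; within Dom (|n| ≤ 2^31 < 2^53)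
-- this is exactly integer truncating division, PySem.Int.truncdiv.
def n1LoopA (num : Int) (acc : List Int) : List Int :=
  if 0 < num then
    n1LoopA (PySem.Int.truncdiv num 100)
      (acc ++ [PySem.Int.truncdiv (PySem.Int.mod num 100) 10])
  else acc
termination_by num.toNat
decreasing_by
  have h : PySem.Int.truncdiv num 100 = num / 100 := Int.tdiv_eq_ediv_of_nonneg (by omega)
  rw [h]; omega

def n1 (number : Int) : List Int := n1LoopA number []

-- ===== PORT B =====
-- first while loop of Source B: collect the decimal digits, least significant first
def n1AltDigits (num : Int) (ds : List Int) : List Int :=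
  if 0 < num then
    n1AltDigits (PySem.Int.floordiv num 10) (ds ++ [PySem.Int.mod num 10])
  else ds
termination_by num.toNat
decreasing_by
  have h : PySem.Int.floordiv num 10 = num / 10 :=
    PySem.Int.floordiv_eq_ediv_of_pos (by omega)
  rw [h]; omega

-- second while loop of Source B: pop the units digit of each pair, append its tens digit (0 if absent)
def n1AltPairs (ds : List Int) (out : List Int) : List Int :=
  match ds with
  | [] => out
  | [_] => out ++ [0]
  | _ :: d :: rest => n1AltPairs rest (out ++ [d])

def n1_alt (number : Int) : List Int := n1AltPairs (n1AltDigits number []) []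

-- ===== PRECONDITION & SPEC =====
def Spec_n1 (number : Int) (out : List Int) : Prop := out = n1_alt number
instance (number : Int) (out : List Int) : Decidable (Spec_n1 number out) := by unfold Spec_n1; infer_instance

-- ===== CLAIM (what is proved, stated in full; the proofs are below) =====
def Claim_equal_n1 : Prop := ∀ (number : Int), Dom_n1 number → Spec_n1 number (n1 number)

-- ===== LEMMAS AND PROOFS =====

theorem n1LoopA_acc_aux (k : Nat) :
    ∀ num : Int, num.toNat ≤ k → ∀ acc, n1LoopA num acc = acc ++ n1LoopA num [] := by
  induction k with
  | zero =>
    intro num h acc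
    rw [n1LoopA.eq_def]; conv_rhs => rw [n1LoopA.eq_def]
    split_ifs with hp
    · omega
    · simp
  | succ k ih =>
    intro num h acc
    rw [n1LoopA.eq_def]; conv_rhs => rw [n1LoopA.eq_def]
    split_ifs with hp
    · have ht : PySem.Int.truncdiv num 100 = num / 100 := Int.tdiv_eq_ediv_of_nonneg (by omega)
      have hk : (PySem.Int.truncdiv num 100).toNat ≤ k := by rw [ht]; omega
      rw [ih _ hk, ih _ hk ([] ++ _)]
      simp
    · simp

theorem n1AltDigits_acc_aux (k : Nat) :
    ∀ num : Int, num.toNat ≤ k → ∀ ds, n1AltDigits num ds = ds ++ n1AltDigits num [] := by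
  induction k with
  | zero =>
    intro num h ds
    rw [n1AltDigits.eq_def]; conv_rhs => rw [n1AltDigits.eq_def]
    split_ifs with hp
    · omega
    · simp
  | succ k ih =>
    intro num h ds
    rw [n1AltDigits.eq_def]; conv_rhs => rw [n1AltDigits.eq_def]
    split_ifs with hp
    · have ht : PySem.Int.floordiv num 10 = num / 10 :=
        PySem.Int.floordiv_eq_ediv_of_pos (by omega)
      have hk : (PySem.Int.floordiv num 10).toNat ≤ k := by rw [ht]; omega
      rw [ih _ hk, ih _ hk ([] ++ _)]
      simp
    · simp

theorem n1AltPairs_acc : ∀ (ds out : List Int), n1AltPairs ds out = out ++ n1AltPairs ds []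
  | [], out => by simp [n1AltPairs]
  | [a], out => by simp [n1AltPairs]
  | a :: d :: rest, out => by
    rw [n1AltPairs, n1AltPairs, n1AltPairs_acc rest (out ++ [d]), n1AltPairs_acc rest ([] ++ [d])]
    simp

theorem n1_main_aux (k : Nat) :
    ∀ num : Int, num.toNat ≤ k → n1LoopA num [] = n1AltPairs (n1AltDigits num []) [] := by
  induction k with
  | zero =>
    intro num h
    rw [n1LoopA.eq_def, n1AltDigits.eq_def]
    split_ifs with hp
    · omega
    · simp [n1AltPairs]
  | succ k ih =>
    intro num h
    rw [n1LoopA.eq_def, n1AltDigits.eq_def]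
    split_ifs with hp
    · have ht100 : PySem.Int.truncdiv num 100 = num / 100 := Int.tdiv_eq_ediv_of_nonneg (by omega)
      have hm100 : PySem.Int.mod num 100 = num % 100 := PySem.Int.mod_eq_emod_of_pos (by omega)
      have htd : PySem.Int.truncdiv (PySem.Int.mod num 100) 10 = (num % 100) / 10 := by
        rw [hm100]; exact Int.tdiv_eq_ediv_of_nonneg (by omega)
      have hf10 : PySem.Int.floordiv num 10 = num / 10 := PySem.Int.floordiv_eq_ediv_of_pos (by omega)
      have hm10 : PySem.Int.mod num 10 = num % 10 := PySem.Int.mod_eq_emod_of_pos (by omega)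
      rw [ht100, htd, hf10, hm10]
      rw [n1AltDigits_acc_aux ((num / 10).toNat) (num / 10) (le_refl _) ([] ++ [num % 10])]
      rw [n1LoopA_acc_aux ((num / 100).toNat) (num / 100) (le_refl _) ([] ++ [(num % 100) / 10])]
      by_cases h10 : 0 < num / 10
      · -- num has at least two digits
        conv_rhs => rw [n1AltDigits.eq_def]
        rw [if_pos h10]
        have hf10' : PySem.Int.floordiv (num / 10) 10 = num / 100 := by
          rw [PySem.Int.floordiv_eq_ediv_of_pos (by omega)]; omega
        have hm10' : PySem.Int.mod (num / 10) 10 = (num / 10) % 10 :=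
          PySem.Int.mod_eq_emod_of_pos (by omega)
        rw [hf10', hm10']
        rw [n1AltDigits_acc_aux ((num / 100).toNat) (num / 100) (le_refl _) ([] ++ [(num / 10) % 10])]
        simp only [List.nil_append, List.cons_append]
        rw [show (num % 100) / 10 = (num / 10) % 10 by omega]
        rw [n1AltPairs]
        rw [n1AltPairs_acc (n1AltDigits (num / 100) []) ([] ++ [num / 10 % 10])]
        have hk' : (num / 100).toNat ≤ k := by omega
        rw [ih _ hk']
        simp
      · -- single digit: num / 10 = 0
        have hz : num / 10 = 0 := by omega
        have hz100 : num / 100 = 0 := by omega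
        rw [hz, hz100]
        rw [show n1AltDigits 0 [] = [] by rw [n1AltDigits.eq_def]; simp]
        rw [show n1LoopA 0 [] = [] by rw [n1LoopA.eq_def]; simp]
        simp [n1AltPairs]
        omega
    · simp [n1AltPairs]

-- ===== VERDICT (by name: the statement is the Claim_ definition above) =====
theorem n1_spec : Claim_equal_n1 := by
  intro number _
  unfold Spec_n1 n1 n1_alt
  exact n1_main_aux number.toNat number (le_refl _)
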